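-- pv_equiv track=rewrite | github.com/AdamOtto/Daily-Challenges | Challenge332.py | Solution
-- ===== SOURCE A (Python) =====
-- def Solution(M, N):
--     a = 0
--     b = M
--     retVal = []
--     for i in range(0, int(M / 2) + 1):
--         a = i
--         b = M - a
--         if a ^ b == N:
--             retVal.append( (a,b) )
--     return retVal
-- ===== SOURCE B (Python) =====
-- def Solution(M, N):
--     # a + b = (a ^ b) + 2*(a & b): the shared bits must be c = (M - N) / 2,
--     # disjoint from N; every solution is a = c + s for a subset s of N's bits.
--     if N < 0:
--         return []
--     d = M - N
--     if d < 0 or d % 2: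
--         return []
--     c = d // 2
--     if c & N:
--         return []
--     subs = [0]          # subset sums of N's bits, kept in increasing order
--     n, p = N, 1
--     while n:
--         if n & 1:
--             subs += [s + p for s in subs]
--         n >>= 1
--         p <<= 1
--     return [(c + s, M - c - s) for s in subs if 2 * (c + s) <= M]
-- ===== Notes on version B (the rewrite author's own statement) =====
-- stated objective: faster
-- what changed: Instead of scanning all a in 0..M/2 and testing a^(M-a)==N, B uses a+b=(a^b)+2(a&b): it checks that c=(M-N)/2 is a nonnegative integer disjoint from N and then enumerates the subset sums of N's bits in increasing order, emitting a=c+s directly.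
-- intended difference: For M=-1, N=-1 the truncating int(M/2) lets A's loop run once with b=-1 and A returns [(0,-1)], a pair with a negative component; B returns [], the intended value since no pair of the puzzle's nonnegative summands with a+b=M exists for negative M. — e.g. on Solution(-1, -1): A returns [[0, -1]], B returns []
import Mathlib
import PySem

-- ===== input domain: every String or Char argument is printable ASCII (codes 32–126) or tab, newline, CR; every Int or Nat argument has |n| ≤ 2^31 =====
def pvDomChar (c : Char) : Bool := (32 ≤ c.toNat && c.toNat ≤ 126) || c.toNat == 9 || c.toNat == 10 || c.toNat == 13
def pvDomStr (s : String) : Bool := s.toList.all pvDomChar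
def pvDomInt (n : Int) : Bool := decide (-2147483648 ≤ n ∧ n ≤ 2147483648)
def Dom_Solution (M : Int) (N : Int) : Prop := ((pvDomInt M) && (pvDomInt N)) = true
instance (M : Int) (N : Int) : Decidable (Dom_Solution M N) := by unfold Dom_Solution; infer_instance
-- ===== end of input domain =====

-- B replaces A's O(M) scan by the identity a+b = (a^b) + 2(a&b): with c = (M-N)/2 the
-- solutions are exactly a = c + s for subsets s of N's bits, enumerated in increasing order.

-- ===== PORT A =====
def Solution (M : Int) (N : Int) : List (List Int) :=
  -- 'int(M / 2)' truncates toward zero; |M| ≤ 2^31 < 2^53 so it is PySem.Int.truncdiv M 2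
  (PySem.List.pyRange 0 (PySem.Int.truncdiv M 2 + 1)).foldl
    (fun retVal i =>
      let a := i
      let b := M - a
      if PySem.Int.bxor a b = N then retVal ++ [[a, b]] else retVal) []

-- ===== PORT B =====
-- the 'while n:' loop of Source B; it is only entered with n = N ≥ 0 (B returns [] for N < 0),
-- and on n < 0 the Python loop would never terminate, so the 'n ≤ 0' exit is exact on all reached states
def buildSubs (n : Int) (p : Int) (subs : List Int) : List Int :=
  if _h : n ≤ 0 then subs
  else
    buildSubs (n >>> (1 : Nat)) (p <<< (1 : Nat))
      (if PySem.Int.band n 1 ≠ 0 then subs ++ subs.map (· + p) else subs)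
termination_by n.toNat
decreasing_by
  rw [Int.shiftRight_eq_div_pow]; omega

def Solution_alt (M : Int) (N : Int) : List (List Int) :=
  if N < 0 then []
  else
    let d := M - N
    if d < 0 ∨ PySem.Int.mod d 2 ≠ 0 then []
    else
      let c := PySem.Int.floordiv d 2
      if PySem.Int.band c N ≠ 0 then []
      else
        let subs := buildSubs N 1 [0]
        (subs.filter (fun s => decide (2 * (c + s) ≤ M))).map (fun s => [c + s, M - c - s])

-- ===== PRECONDITION & SPEC =====
-- For M = -1, N = -1 the truncating int(M/2) lets A's loop run once with b = -1 and A returns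
-- [(0, -1)]; B returns [], the intended value, since the puzzle's pairs of nonnegative summands
-- a + b = M do not exist for negative M.
def D_Solution (M : Int) (N : Int) : Prop := M = -1 ∧ N = -1
instance (M : Int) (N : Int) : Decidable (D_Solution M N) := by unfold D_Solution; infer_instance

def Spec_Solution (M : Int) (N : Int) (out : List (List Int)) : Prop :=
  ¬ D_Solution M N → out = Solution_alt M N
instance (M : Int) (N : Int) (out : List (List Int)) : Decidable (Spec_Solution M N out) := by
  unfold Spec_Solution; infer_instance

def pvDiffWitness_Solution : Int × Int := (-1, -1)
def pvDiffWitnessOut_Solution : (List (List Int)) × (List (List Int)) := ([[0, -1]], [])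

-- ===== CLAIM (what is proved, stated in full; the proofs are below) =====
def Claim_unchanged_Solution : Prop := ∀ (M : Int) (N : Int), Dom_Solution M N → Spec_Solution M N (Solution M N)
def Claim_changed_Solution : Prop := Dom_Solution (pvDiffWitness_Solution.1) (pvDiffWitness_Solution.2) ∧ D_Solution (pvDiffWitness_Solution.1) (pvDiffWitness_Solution.2) ∧ Solution (pvDiffWitness_Solution.1) (pvDiffWitness_Solution.2) = pvDiffWitnessOut_Solution.1 ∧ Solution_alt (pvDiffWitness_Solution.1) (pvDiffWitness_Solution.2) = pvDiffWitnessOut_Solution.2 ∧ pvDiffWitnessOut_Solution.1 ≠ pvDiffWitnessOut_Solution.2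
def Claim_exact_Solution : Prop := ∀ (M : Int) (N : Int), Dom_Solution M N → D_Solution M N → Solution M N ≠ Solution_alt M N

-- ===== LEMMAS AND PROOFS =====

-- ---- pure Nat bit arithmetic ----

lemma bit0_and (x y : Nat) : ((x &&& y) % 2 = 1) ↔ (x % 2 = 1 ∧ y % 2 = 1) := by
  have h := Nat.testBit_and x y 0
  simp only [Nat.testBit_zero] at h
  rw [← decide_eq_true_iff (p := (x &&& y) % 2 = 1), h, Bool.and_eq_true, decide_eq_true_iff,
    decide_eq_true_iff]

lemma bit0_xor (x y : Nat) : ((x ^^^ y) % 2 = 1) ↔ ((x % 2 = 1) ↔ ¬(y % 2 = 1)) := by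
  have h := Nat.testBit_xor x y 0
  simp only [Nat.testBit_zero] at h
  rw [← decide_eq_true_iff (p := (x ^^^ y) % 2 = 1), h]
  cases hx : decide (x % 2 = 1) <;> cases hy : decide (y % 2 = 1) <;> simp_all

lemma mod2_and (x y : Nat) : (x &&& y) % 2 = x % 2 * (y % 2) := by
  have h := bit0_and x y
  rcases Nat.mod_two_eq_zero_or_one x with hx | hx <;>
    rcases Nat.mod_two_eq_zero_or_one y with hy | hy <;> rw [hx, hy] <;> omega

lemma mod2_xor (x y : Nat) : (x ^^^ y) % 2 = (x % 2 + y % 2) % 2 := by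
  have h := bit0_xor x y
  omega

lemma add_xor_and (x y : Nat) : x + y = (x ^^^ y) + 2 * (x &&& y) := by
  induction x using Nat.strong_induction_on generalizing y with
  | _ x ih =>
    rcases Nat.eq_zero_or_pos x with rfl | hx
    · simp
    have ihh := ih (x / 2) (by omega) (y / 2)
    have h1 := Nat.and_div_two (a := x) (b := y)
    have h2 := mod2_and x y
    have h3 := Nat.xor_div_two (a := x) (b := y)
    have h4 := mod2_xor x y
    rcases Nat.mod_two_eq_zero_or_one x with hx2 | hx2 <;>
      rcases Nat.mod_two_eq_zero_or_one y with hy2 | hy2 <;>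
        rw [hx2, hy2] at h2 <;> omega

lemma disj_add_xor {x y : Nat} (h : x &&& y = 0) : x + y = x ^^^ y := by
  have := add_xor_and x y; omega

lemma and_xor_zero (x y : Nat) : (x &&& y) &&& (x ^^^ y) = 0 := by
  apply Nat.eq_of_testBit_eq; intro i
  simp only [Nat.testBit_and, Nat.testBit_xor, Nat.zero_testBit]
  cases x.testBit i <;> cases y.testBit i <;> simp

lemma testBit_subset {s n : Nat} (hs : s &&& n = s) :
    ∀ i, s.testBit i = true → n.testBit i = true := by
  intro i hi
  have h := congrArg (fun z => z.testBit i) hs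
  simp only [Nat.testBit_and, hi, Bool.true_and] at h
  exact h

lemma subset_xor_disj {s n : Nat} (hs : s &&& n = s) : s &&& (n ^^^ s) = 0 := by
  apply Nat.eq_of_testBit_eq; intro i
  simp only [Nat.testBit_and, Nat.testBit_xor, Nat.zero_testBit]
  cases hsi : s.testBit i
  · simp
  · simp [testBit_subset hs i hsi]

lemma xor_subset {s n : Nat} (hs : s &&& n = s) : (n ^^^ s) &&& n = n ^^^ s := by
  apply Nat.eq_of_testBit_eq; intro i
  simp only [Nat.testBit_and, Nat.testBit_xor]
  cases hsi : s.testBit i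
  · simp
  · simp [testBit_subset hs i hsi]

lemma subc1 {c s n : Nat} (hs : s &&& n = s) (hc : c &&& n = 0) : c &&& s = 0 := by
  apply Nat.eq_of_testBit_eq; intro i
  have h := congrArg (fun z => z.testBit i) hc
  simp only [Nat.testBit_and, Nat.zero_testBit] at h ⊢
  cases hsi : s.testBit i
  · simp
  · simp [testBit_subset hs i hsi] at h
    simp [h]

lemma n_split {s n : Nat} (hs : s &&& n = s) : s + (n ^^^ s) = n := by
  rw [disj_add_xor (subset_xor_disj hs)]
  rw [Nat.xor_comm n s, ← Nat.xor_assoc, Nat.xor_self, Nat.zero_xor]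

lemma xkey1 (x y : Nat) : (x &&& y) &&& (x &&& (x ^^^ y)) = 0 := by
  apply Nat.eq_of_testBit_eq; intro i
  simp only [Nat.testBit_and, Nat.testBit_xor, Nat.zero_testBit]
  cases x.testBit i <;> cases y.testBit i <;> simp

lemma xkey2 (x y : Nat) : (x &&& y) ^^^ (x &&& (x ^^^ y)) = x := by
  apply Nat.eq_of_testBit_eq; intro i
  simp only [Nat.testBit_and, Nat.testBit_xor]
  cases x.testBit i <;> cases y.testBit i <;> simp

lemma subset_split (s m : Nat) :
    s &&& m = s ↔ (s % 2 ≤ m % 2 ∧ (s / 2) &&& (m / 2) = s / 2) := by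
  have h1 := Nat.and_div_two (a := s) (b := m)
  have h2 := mod2_and s m
  have h3 : (s / 2) &&& (m / 2) ≤ s / 2 := Nat.and_le_left
  rcases Nat.mod_two_eq_zero_or_one s with hs2 | hs2 <;>
    rcases Nat.mod_two_eq_zero_or_one m with hm2 | hm2 <;>
      rw [hs2, hm2] at h2 <;> omega

lemma key_iff {m n c : Nat} (hm : m = n + 2 * c) (hc : c &&& n = 0)
    {x : Nat} (hx : 2 * x ≤ m) :
    x ^^^ (m - x) = n ↔ ∃ s, s &&& n = s ∧ x = c + s := by
  constructor
  · intro h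
    set y := m - x with hy
    have hid := add_xor_and x y
    have hxy : x + y = m := by omega
    rw [h] at hid
    have hcc : x &&& y = c := by omega
    refine ⟨x &&& n, ?_, ?_⟩
    · rw [← h]; simp
    · rw [← hcc, ← h]
      rw [disj_add_xor (xkey1 x y), xkey2]
  · rintro ⟨s, hs, rfl⟩
    have hsn : s ≤ n := le_of_eq_of_le hs.symm Nat.and_le_right
    have h1 := n_split hs
    have hb : m - (c + s) = c + (n ^^^ s) := by omega
    rw [hb]
    rw [disj_add_xor (subc1 hs hc), disj_add_xor (subc1 (xor_subset hs) hc)]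
    have : (c ^^^ s) ^^^ (c ^^^ (n ^^^ s)) = s ^^^ (n ^^^ s) := by
      rw [Nat.xor_comm c s, Nat.xor_assoc, ← Nat.xor_assoc c c, Nat.xor_self, Nat.zero_xor]
    rw [this, Nat.xor_comm n s, ← Nat.xor_assoc, Nat.xor_self, Nat.zero_xor]

-- ---- Nat mirror of buildSubs ----

def natBuild (m k : Nat) (subs : List Nat) : List Nat :=
  if m = 0 then subs
  else natBuild (m / 2) (k + 1) (if m % 2 = 1 then subs ++ subs.map (· + 2 ^ k) else subs)
termination_by m
decreasing_by omega

lemma natBuild_mem (m : Nat) : ∀ (k : Nat) (subs : List Nat) (x : Nat),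
    x ∈ natBuild m k subs ↔ ∃ y ∈ subs, ∃ s, s &&& m = s ∧ x = y + 2 ^ k * s := by
  induction m using Nat.strong_induction_on with
  | _ m ih =>
    intro k subs x
    rcases Nat.eq_zero_or_pos m with rfl | hm
    · rw [natBuild]
      simp only [if_pos]
      constructor
      · intro hx; exact ⟨x, hx, 0, by simp⟩
      · rintro ⟨y, hy, s, hs, rfl⟩
        have : s = 0 := by simpa using hs.symm
        simp [this, hy]
    · rw [natBuild, if_neg (by omega)]
      rw [ih (m / 2) (by omega)]
      have h2 : (2:Nat) ^ (k + 1) = 2 ^ k * 2 := by ring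
      constructor
      · rintro ⟨y', hy', s', hs', rfl⟩
        by_cases hodd : m % 2 = 1
        · rw [if_pos hodd] at hy'
          rcases List.mem_append.1 hy' with hy | hy
          · refine ⟨y', hy, 2 * s', ?_, by rw [h2]; ring⟩
            rw [subset_split, show (2 * s') / 2 = s' from by omega]
            exact ⟨by omega, hs'⟩
          · obtain ⟨y, hy, hyy⟩ := List.mem_map.1 hy
            refine ⟨y, hy, 2 * s' + 1, ?_, by rw [← hyy, h2]; ring⟩
            rw [subset_split, show (2 * s' + 1) / 2 = s' from by omega]
            exact ⟨by omega, hs'⟩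
        · rw [if_neg hodd] at hy'
          refine ⟨y', hy', 2 * s', ?_, by rw [h2]; ring⟩
          rw [subset_split, show (2 * s') / 2 = s' from by omega]
          exact ⟨by omega, hs'⟩
      · rintro ⟨y, hy, s, hs, rfl⟩
        rw [subset_split] at hs
        obtain ⟨hb, hdiv⟩ := hs
        rcases Nat.mod_two_eq_zero_or_one s with hs2 | hs2
        · obtain ⟨t, rfl⟩ : ∃ t, s = 2 * t := ⟨s / 2, by omega⟩
          rw [show (2 * t) / 2 = t from by omega] at hdiv
          refine ⟨y, ?_, t, hdiv, by rw [h2]; ring⟩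
          split <;> simp [hy]
        · have hm2 : m % 2 = 1 := by omega
          obtain ⟨t, rfl⟩ : ∃ t, s = 2 * t + 1 := ⟨s / 2, by omega⟩
          rw [show (2 * t + 1) / 2 = t from by omega] at hdiv
          rw [if_pos hm2]
          refine ⟨y + 2 ^ k, List.mem_append.2 (Or.inr (List.mem_map.2 ⟨y, hy, rfl⟩)), t,
            hdiv, by rw [h2]; ring⟩

lemma natBuild_sorted (m : Nat) : ∀ (k : Nat) (subs : List Nat),
    subs.Pairwise (· < ·) → (∀ x ∈ subs, x < 2 ^ k) →
    (natBuild m k subs).Pairwise (· < ·) := by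
  induction m using Nat.strong_induction_on with
  | _ m ih =>
    intro k subs hp hb
    rcases Nat.eq_zero_or_pos m with rfl | hm
    · rw [natBuild]; simpa using hp
    rw [natBuild, if_neg (by omega)]
    have h2 : (2:Nat) ^ (k + 1) = 2 ^ k * 2 := by ring
    apply ih (m / 2) (by omega)
    · split
      · rw [List.pairwise_append]
        refine ⟨hp, ?_, ?_⟩
        · exact List.Pairwise.map _ (fun a b hab => by omega) hp
        · intro a ha b hbm
          obtain ⟨z, hz, rfl⟩ := List.mem_map.1 hbm
          have := hb a ha
          omega
      · exact hp
    · intro x hx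
      split at hx
      · rcases List.mem_append.1 hx with h | h
        · have := hb x h; omega
        · obtain ⟨z, hz, rfl⟩ := List.mem_map.1 h
          have := hb z hz; omega
      · have := hb x hx; omega

lemma buildSubs_eq_natBuild (m : Nat) : ∀ (k : Nat) (subs : List Nat),
    buildSubs (m : Int) (2 ^ k) (subs.map (fun x : Nat => (x : Int)))
      = (natBuild m k subs).map (fun x : Nat => (x : Int)) := by
  induction m using Nat.strong_induction_on with
  | _ m ih =>
    intro k subs
    rcases Nat.eq_zero_or_pos m with rfl | hm
    · rw [buildSubs, natBuild]; simp
    have hnot : ¬ (m : Int) ≤ 0 := by omega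
    have hm0 : ¬ m = 0 := by omega
    have hshift : ((m : Int) >>> (1 : Nat)) = ((m / 2 : Nat) : Int) := by
      simp [Int.shiftRight_eq_div_pow]
    have hp : ((2:Int) ^ k) <<< (1 : Nat) = 2 ^ (k + 1) := by
      rw [Int.shiftLeft_eq]; ring
    have hband : PySem.Int.band (m : Int) 1 = ((m % 2 : Nat) : Int) := by
      rw [show (1 : Int) = ((1 : Nat) : Int) from rfl, PySem.Int.band_natCast,
        Nat.and_one_is_mod]
    rw [buildSubs, dif_neg hnot, natBuild, if_neg hm0, hshift, hp, hband]
    by_cases hodd : m % 2 = 1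
    · rw [if_pos (by rw [hodd]; norm_num), if_pos hodd]
      rw [← ih (m / 2) (by omega) (k + 1) (subs ++ subs.map (· + 2 ^ k))]
      congr 1
      rw [List.map_append, List.map_map, List.map_map]
      simp [Function.comp_def]
    · have hmod0 : m % 2 = 0 := by omega
      rw [if_neg (by rw [hmod0]; norm_num), if_neg hodd]
      exact ih (m / 2) (by omega) (k + 1) _

-- ---- the core list equality on Nat ----

lemma nat_core {m n c : Nat} (hm : m = n + 2 * c) (hc : c &&& n = 0) :
    (List.range (m / 2 + 1)).filter (fun a => decide (a ^^^ (m - a) = n))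
      = ((natBuild n 0 [0]).filter (fun s => decide (2 * (c + s) ≤ m))).map (fun s => c + s) := by
  have hmem0 : ∀ s, s ∈ natBuild n 0 [0] ↔ s &&& n = s := by
    intro s
    rw [natBuild_mem]
    constructor
    · rintro ⟨y, hy, t, ht, rfl⟩
      simp at hy
      subst hy
      simpa using ht
    · intro hs
      exact ⟨0, by simp, s, hs, by simp⟩
  have hsort2 : ((natBuild n 0 [0]).filter (fun s => decide (2 * (c + s) ≤ m))).Pairwise (· < ·) :=
    ((natBuild_sorted n 0 [0] (by simp) (by simp)).filter _)
  have hs1 : ((List.range (m / 2 + 1)).filter (fun a => decide (a ^^^ (m - a) = n))).Pairwise (· < ·) :=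
    List.pairwise_lt_range.filter _
  have hs2 : (((natBuild n 0 [0]).filter (fun s => decide (2 * (c + s) ≤ m))).map (fun s => c + s)).Pairwise (· < ·) :=
    hsort2.map _ (fun a b hab => by omega)
  apply List.Perm.eq_of_pairwise (fun a b _ _ h1 h2 => by omega) hs1 hs2
  apply (List.perm_ext_iff_of_nodup (hs1.imp (fun h => Nat.ne_of_lt h)) (hs2.imp (fun h => Nat.ne_of_lt h))).2
  intro x
  simp only [List.mem_filter, List.mem_range, List.mem_map, decide_eq_true_eq]
  constructor
  · rintro ⟨hlt, hxor⟩
    have hx2 : 2 * x ≤ m := by omega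
    obtain ⟨s, hs, rfl⟩ := (key_iff hm hc hx2).1 hxor
    exact ⟨s, ⟨(hmem0 s).2 hs, by omega⟩, rfl⟩
  · rintro ⟨s, ⟨hsmem, hle⟩, rfl⟩
    have hs := (hmem0 s).1 hsmem
    have hx2 : 2 * (c + s) ≤ m := by omega
    exact ⟨by omega, (key_iff hm hc hx2).2 ⟨s, hs, rfl⟩⟩

-- ---- Int-side shapes ----

lemma A_shape (M N : Int) :
    Solution M N
      = ((PySem.List.pyRange 0 (PySem.Int.truncdiv M 2 + 1)).filter
          (fun i => decide (PySem.Int.bxor i (M - i) = N))).map (fun i => [i, M - i]) := by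
  unfold Solution
  exact PySem.List.foldl_append_ite (fun i => PySem.Int.bxor i (M - i) = N) (fun i => [i, M - i]) _ []

lemma truncdiv_nonneg (m : Nat) : PySem.Int.truncdiv (m : Int) 2 = ((m / 2 : Nat) : Int) := by
  simp [PySem.Int.truncdiv]

lemma truncdiv_le_neg (M : Int) (h : M ≤ -2) : PySem.Int.truncdiv M 2 ≤ -1 := by
  simp only [PySem.Int.truncdiv]
  have h1 : M.tdiv 2 = -((-M).tdiv 2) := by simp [Int.neg_tdiv]
  have h2 : (-M).tdiv 2 = (-M) / 2 := Int.tdiv_eq_ediv_of_nonneg (by omega)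
  omega

lemma A_empty_iff (M N : Int) :
    (∀ i : Int, 0 ≤ i → i < PySem.Int.truncdiv M 2 + 1 → PySem.Int.bxor i (M - i) ≠ N) →
    Solution M N = [] := by
  intro h
  rw [A_shape, List.map_eq_nil_iff, List.filter_eq_nil_iff]
  intro i hi
  rw [PySem.List.mem_pyRange_one] at hi
  simpa using h i hi.1 hi.2

lemma A_empty_of_neg (M N : Int) (hM : M < 0) (h : ¬ D_Solution M N) : Solution M N = [] := by
  apply A_empty_iff
  intro i hi0 hilt hxor
  rcases lt_or_ge M (-1) with hM2 | hM2
  · have := truncdiv_le_neg M (by omega)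
    omega
  · have hM1 : M = -1 := by omega
    subst hM1
    have : PySem.Int.truncdiv (-1) 2 = 0 := by decide
    rw [this] at hilt
    have hi : i = 0 := by omega
    subst hi
    have : PySem.Int.bxor 0 (-1 - 0) = -1 := by decide
    rw [this] at hxor
    exact h ⟨rfl, hxor.symm⟩

lemma main_eq (M N : Int) (h : ¬ D_Solution M N) : Solution M N = Solution_alt M N := by
  unfold Solution_alt
  dsimp only
  rcases lt_or_ge M 0 with hM | hM
  · -- M < 0: both sides empty
    split_ifs with h1 h2 h3
    · exact A_empty_of_neg M N hM h
    · exact A_empty_of_neg M N hM h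
    · omega
    · omega
  · -- 0 ≤ M
    obtain ⟨mN, rfl⟩ : ∃ mN : Nat, M = (mN : Int) := ⟨M.toNat, by omega⟩
    have htd : PySem.Int.truncdiv (mN : Int) 2 + 1 = ((mN / 2 + 1 : Nat) : Int) := by
      rw [truncdiv_nonneg]; push_cast; ring
    split_ifs with h1 h2 h3
    · -- N < 0: A is empty because every xor in the loop is nonnegative
      apply A_empty_iff
      intro i hi0 hilt hxor
      rw [htd] at hilt
      have hble : 0 ≤ (mN : Int) - i := by
        have : i ≤ ((mN / 2 : Nat) : Int) := by push_cast at hilt ⊢; omega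
        have h2 : ((mN / 2 : Nat) : Int) ≤ (mN : Int) := by push_cast; omega
        omega
      rw [PySem.Int.bxor_of_nonneg hi0 hble] at hxor
      omega
    all_goals obtain ⟨nN, rfl⟩ : ∃ nN : Nat, N = (nN : Int) := ⟨N.toNat, by omega⟩
    · -- M - N < 0 or odd: A empty
      apply A_empty_iff
      intro i hi0 hilt hxor
      rw [htd] at hilt
      obtain ⟨a, rfl⟩ : ∃ a : Nat, i = (a : Int) := ⟨i.toNat, by omega⟩
      have ha : a ≤ mN / 2 := by push_cast at hilt; omega
      have hsub : (mN : Int) - (a : Int) = ((mN - a : Nat) : Int) := by omega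
      rw [hsub, PySem.Int.bxor_natCast] at hxor
      have hxorN : a ^^^ (mN - a) = nN := by exact_mod_cast hxor
      have hid := add_xor_and a (mN - a)
      rw [hxorN] at hid
      have hsum : a + (mN - a) = mN := by omega
      rcases h2 with hlt | hmod
      · omega
      · have hd : (mN : Int) - (nN : Int) = ((mN - nN : Nat) : Int) := by omega
        rw [hd, PySem.Int.mod_eq_emod_of_pos (by omega)] at hmod
        omega
    · -- c & N ≠ 0: A empty
      apply A_empty_iff
      intro i hi0 hilt hxor
      rw [htd] at hilt
      obtain ⟨a, rfl⟩ : ∃ a : Nat, i = (a : Int) := ⟨i.toNat, by omega⟩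
      have ha : a ≤ mN / 2 := by push_cast at hilt; omega
      have hsub : (mN : Int) - (a : Int) = ((mN - a : Nat) : Int) := by omega
      rw [hsub, PySem.Int.bxor_natCast] at hxor
      have hxorN : a ^^^ (mN - a) = nN := by exact_mod_cast hxor
      have hid := add_xor_and a (mN - a)
      rw [hxorN] at hid
      have hsum : a + (mN - a) = mN := by omega
      push Not at h2
      have hfd : PySem.Int.floordiv ((mN : Int) - (nN : Int)) 2
          = ((a &&& (mN - a) : Nat) : Int) := by
        rw [PySem.Int.floordiv_eq_ediv_of_pos (by omega)]
        omega
      rw [hfd, PySem.Int.band_natCast] at h3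
      have : (a &&& (mN - a)) &&& nN = 0 := by
        rw [← hxorN]; exact and_xor_zero a (mN - a)
      rw [this] at h3
      simp at h3
    · -- main case
      push Not at h2
      obtain ⟨hd0, hmod⟩ := h2
      have hge : nN ≤ mN := by omega
      have heven : (mN - nN) % 2 = 0 := by
        have hd : (mN : Int) - (nN : Int) = ((mN - nN : Nat) : Int) := by omega
        rw [hd, PySem.Int.mod_eq_emod_of_pos (by omega)] at hmod
        omega
      set cN : Nat := (mN - nN) / 2 with hcN
      have hm : mN = nN + 2 * cN := by omega
      have hfd : PySem.Int.floordiv ((mN : Int) - (nN : Int)) 2 = ((cN : Nat) : Int) := by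
        rw [PySem.Int.floordiv_eq_ediv_of_pos (by omega)]
        omega
      rw [hfd] at h3 ⊢
      rw [PySem.Int.band_natCast] at h3
      push Not at h3
      have hc : cN &&& nN = 0 := by exact_mod_cast h3
      -- rewrite the B side via natBuild
      have hbs : buildSubs (nN : Int) 1 [0]
          = (natBuild nN 0 [0]).map (fun x : Nat => (x : Int)) := by
        have := buildSubs_eq_natBuild nN 0 [(0 : Nat)]
        simpa using this
      rw [hbs]
      -- rewrite the A side to a Nat-level filter
      rw [A_shape, htd, PySem.List.pyRange_zero_natCast]
      rw [List.filter_map, List.map_map, List.filter_map, List.map_map]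
      rw [List.filter_congr (q := fun a : Nat => decide (a ^^^ (mN - a) = nN)) ?_, nat_core hm hc]
      · rw [List.map_map]
        have hpred : ∀ s ∈ natBuild nN 0 [0],
            ((fun s : Int => decide (2 * ((cN : Int) + s) ≤ (mN : Int))) ∘ fun x : Nat => (x : Int)) s
              = (fun s : Nat => decide (2 * (cN + s) ≤ mN)) s := by
          intro s _
          simp only [Function.comp_def]
          rw [decide_eq_decide]
          omega
        conv_rhs => rw [List.filter_congr hpred]
        apply List.map_congr_left
        intro s hs
        rw [List.mem_filter] at hs
        have hle : 2 * (cN + s) ≤ mN := by simpa using hs.2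
        simp only [Function.comp_def]
        push_cast
        rw [sub_add_eq_sub_sub]
      · intro a ha
        rw [List.mem_range] at ha
        simp only [Function.comp_def]
        have hsub : (mN : Int) - (a : Int) = ((mN - a : Nat) : Int) := by omega
        rw [hsub, PySem.Int.bxor_natCast]
        simp [Nat.cast_inj]

-- ===== VERDICT (by name: the statement is the Claim_ definition above) =====
theorem Solution_spec : Claim_unchanged_Solution := by
  intro M N _ hD
  exact main_eq M N hD

theorem Solution_changed : Claim_changed_Solution := by
  unfold Claim_changed_Solution; decide

theorem Solution_tight : Claim_exact_Solution := by
  intro M N _ hD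
  obtain ⟨rfl, rfl⟩ := hD
  decide
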